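-- pv_equiv track=rewrite | github.com/roblass/advent_of_code | 2023/12/one.py | generate_replacements
-- ===== SOURCE A (Python) =====
-- def generate_replacements(s, num_octothorpes, start=0):
--     if num_octothorpes == 0:
--         return [s]
--
--     possibilities = []
--     for i in range(start, len(s)):
--         if s[i] == '?':
--             # Replace '?' with '#'
--             new_s = s[:i] + '#' + s[i+1:]
--             # Recursively generate further replacements
--             further_replacements = generate_replacements(new_s, num_octothorpes - 1, i + 1)
--             possibilities.extend(further_replacements)
--
--     return possibilities
-- ===== SOURCE B (Python) =====
-- def _combos(pos, k):
--     # all k-element combinations of pos, in increasing (lexicographic) order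
--     if k == 0:
--         return [[]]
--     if not pos:
--         return []
--     first, rest = pos[0], pos[1:]
--     return [[first] + c for c in _combos(rest, k - 1)] + _combos(rest, k)
--
--
-- def generate_replacements(s, num_octothorpes, start=0):
--     if num_octothorpes == 0:
--         return [s]
--     if num_octothorpes < 0:
--         return []
--     positions = [i for i in range(start, len(s)) if s[i] == '?']
--     out = []
--     for combo in _combos(positions, num_octothorpes):
--         chars = list(s)
--         for i in combo:
--             chars[i] = '#'
--         out.append(''.join(chars))
--     return out
-- ===== Notes on version B (the rewrite author's own statement) =====
-- stated objective: alternative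
-- what changed: B separates the work into one scan collecting the '?' positions, a pure k-combinations enumeration over that index list, and a single in-place string build per combination, instead of A's recursion that rebuilds and rescans a new string by slicing at every level.
-- outside the precondition, e.g. on generate_replacements('?', 2, -1): A returns ['##'], B returns ['#']; on generate_replacements('ab', 1, -5): A raises IndexError, B raises IndexError
import Mathlib
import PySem

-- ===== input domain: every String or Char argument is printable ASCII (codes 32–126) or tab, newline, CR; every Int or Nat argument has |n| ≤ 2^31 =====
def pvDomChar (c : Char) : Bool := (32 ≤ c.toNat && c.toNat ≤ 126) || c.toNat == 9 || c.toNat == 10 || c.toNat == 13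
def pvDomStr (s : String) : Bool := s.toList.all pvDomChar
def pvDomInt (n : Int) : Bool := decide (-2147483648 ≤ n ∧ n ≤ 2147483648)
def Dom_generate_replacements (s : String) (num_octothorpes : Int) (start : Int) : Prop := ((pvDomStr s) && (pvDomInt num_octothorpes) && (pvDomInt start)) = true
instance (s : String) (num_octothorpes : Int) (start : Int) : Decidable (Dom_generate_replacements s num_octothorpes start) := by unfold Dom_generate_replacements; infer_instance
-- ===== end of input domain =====

-- B replaces A's rebuild-and-rescan recursion by one '?'-position scan, a pure k-combinations
-- enumeration over that index list, and one in-place build per combination (objective: alternative).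


-- ===== PORT A =====
-- fuel only makes the recursion total: under Pre_ (0 ≤ start) the recursion depth is at most
-- s.length + 1 (start strictly increases and must stay below the length), so the fuel never runs out.
def genA : Nat → String → Int → Int → List String
  | 0, _, _, _ => []
  | fuel + 1, s, num, start =>
    if num == 0 then [s]
    else
      (PySem.List.pyRange start (s.toList.length : Int) 1).foldl
        (fun poss i =>
          if PySem.List.pyGet? s.toList i == some '?' then
            -- new_s = s[:i] + '#' + s[i+1:]
            poss ++ genA fuel
              (String.ofList (PySem.List.slice s.toList none (some i) ++
                              '#' :: PySem.List.slice s.toList (some (i + 1)) none))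
              (num - 1) (i + 1)
          else poss)
        []

def generate_replacements (s : String) (num_octothorpes : Int) (start : Int) : List String :=
  genA (s.toList.length + 1) s num_octothorpes start

-- ===== PORT B =====
-- all k-element combinations of pos, in increasing (lexicographic) order
def combosB : Nat → List Int → List (List Int)
  | 0, _ => [[]]
  | _ + 1, [] => []
  | k + 1, p :: rest => ((combosB k rest).map (fun c => p :: c)) ++ combosB (k + 1) rest

-- chars[i] = '#' for each i in combo; exact for 0 ≤ i < len(chars), which holds for the
-- positions B collects under Pre_ (start ≥ 0)
def applyB (cs : List Char) (combo : List Int) : String :=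
  String.ofList (combo.foldl (fun l i => l.set i.toNat '#') cs)

def generate_replacements_alt (s : String) (num_octothorpes : Int) (start : Int) : List String :=
  if num_octothorpes == 0 then [s]
  else if num_octothorpes < 0 then []
  else
    (combosB num_octothorpes.toNat
        ((PySem.List.pyRange start (s.toList.length : Int) 1).filter
          (fun i => PySem.List.pyGet? s.toList i == some '?'))).map
      (applyB s.toList)

-- ===== PRECONDITION & SPEC =====
-- Pre_ excludes negative start: for start < -len(s) A raises IndexError, and for
-- -len(s) ≤ start < 0 A's values come from Python negative-index wraparound combined with
-- slice clamping (A may even return strings longer than s), an accident of the recursion's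
-- internal parameter that no caller of the day-12 solver ever reaches (start is 0 at every
-- external call).
def Pre_generate_replacements (s : String) (num_octothorpes : Int) (start : Int) : Prop :=
  0 ≤ start

instance (s : String) (num_octothorpes : Int) (start : Int) : Decidable (Pre_generate_replacements s num_octothorpes start) := by unfold Pre_generate_replacements; infer_instance

def pvWitness_generate_replacements : String × Int × Int := ("?a?", 2, 0)

def Spec_generate_replacements (s : String) (num_octothorpes : Int) (start : Int) (out : List String) : Prop := out = generate_replacements_alt s num_octothorpes start
instance (s : String) (num_octothorpes : Int) (start : Int) (out : List String) : Decidable (Spec_generate_replacements s num_octothorpes start out) := by unfold Spec_generate_replacements; infer_instance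

-- ===== CLAIM (what is proved, stated in full; the proofs are below) =====
def Claim_equal_generate_replacements : Prop := ∀ (s : String) (num_octothorpes : Int) (start : Int), Dom_generate_replacements s num_octothorpes start → Pre_generate_replacements s num_octothorpes start → Spec_generate_replacements s num_octothorpes start (generate_replacements s num_octothorpes start)

-- ===== LEMMAS AND PROOFS =====

-- one-step unfolding of genA at positive fuel
theorem genA_succ_pv (fuel : Nat) (s : String) (num start : Int) :
    genA (fuel + 1) s num start =
      if num == 0 then [s]
      else
        (PySem.List.pyRange start (s.toList.length : Int) 1).foldl
          (fun poss i =>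
            if PySem.List.pyGet? s.toList i == some '?' then
              poss ++ genA fuel
                (String.ofList (PySem.List.slice s.toList none (some i) ++
                                '#' :: PySem.List.slice s.toList (some (i + 1)) none))
                (num - 1) (i + 1)
            else poss)
          [] := rfl

-- the position list B collects, as a function of the char list
def posListPV (cs : List Char) (start : Int) : List Int :=
  (PySem.List.pyRange start (cs.length : Int) 1).filter
    (fun i => PySem.List.pyGet? cs i == some '?')

-- A's slice surgery s[:i] + '#' + s[i+1:] is exactly set-at-index for 0 ≤ i < len
theorem slice_set_pv (cs : List Char) (i : Int) (h0 : 0 ≤ i) (h1 : i < cs.length) :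
    PySem.List.slice cs none (some i) ++ '#' :: PySem.List.slice cs (some (i + 1)) none
      = cs.set i.toNat '#' := by
  rw [PySem.List.slice_to _ h0, PySem.List.slice_from _ (show (0:Int) ≤ i + 1 by omega)]
  have : (i + 1).toNat = i.toNat + 1 := by omega
  rw [this]
  exact Eq.symm (List.set_eq_take_cons_drop '#' (by omega))

-- setting index i does not change which later indices hold '?'
theorem posList_set_pv (cs : List Char) (i : Int) (h0 : 0 ≤ i) :
    posListPV (cs.set i.toNat '#') (i + 1) = posListPV cs (i + 1) := by
  unfold posListPV
  rw [List.length_set]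
  apply List.filter_congr
  intro j hj
  have hj' := (PySem.List.mem_pyRange_one).1 hj
  have hj0 : 0 ≤ j := by omega
  rw [PySem.List.pyGet?_of_nonneg _ hj0, PySem.List.pyGet?_of_nonneg _ hj0,
      List.getElem?_set_ne (by omega)]

-- applying i then a combo equals applying the combo to the set list (definitional)
theorem applyB_cons_pv (cs : List Char) (i : Int) (c : List Int) :
    applyB cs (i :: c) = applyB (cs.set i.toNat '#') c := rfl

-- B's value for any nonnegative count, through posListPV
theorem alt_nonneg_pv (s : String) (m start : Int) (hm : 0 ≤ m) :
    generate_replacements_alt s m start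
      = (combosB m.toNat (posListPV s.toList start)).map (applyB s.toList) := by
  unfold generate_replacements_alt posListPV
  rcases eq_or_lt_of_le hm with h | h
  · subst h; simp [combosB, applyB, String.ofList_toList]
  · have h1 : ¬ (m == 0) = true := by simp; omega
    have h2 : ¬ m < 0 := by omega
    simp [h1, h2]

-- the combinatorial core: combinations over the position list, expanded along the range
theorem combos_expand_pv (cs : List Char) :
    ∀ (n : Nat) (start : Int) (k : Nat), 0 ≤ start → (cs.length : Int) ≤ start + n →
    ((combosB (k + 1) (posListPV cs start)).map (applyB cs))
      = (PySem.List.pyRange start (cs.length : Int) 1).flatMap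
          (fun i => if PySem.List.pyGet? cs i == some '?' then
              (combosB k (posListPV cs (i + 1))).map (fun c => applyB cs (i :: c))
            else []) := by
  intro n
  induction n with
  | zero =>
    intro start k h0 hlen
    have : (cs.length : Int) ≤ start := by omega
    rw [PySem.List.pyRange_one_eq_nil this]
    unfold posListPV
    rw [PySem.List.pyRange_one_eq_nil this]
    simp [combosB]
  | succ n ih =>
    intro start k h0 hlen
    by_cases hlt : start < (cs.length : Int)
    · rw [PySem.List.pyRange_one_cons hlt]
      have hpos : posListPV cs start
          = if PySem.List.pyGet? cs start == some '?'
            then start :: posListPV cs (start + 1) else posListPV cs (start + 1) := by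
        unfold posListPV
        rw [PySem.List.pyRange_one_cons hlt, List.filter_cons]
      rw [List.flatMap_cons, ← ih (start + 1) k (by omega) (by omega), hpos]
      by_cases hq : (PySem.List.pyGet? cs start == some '?') = true
      · simp only [hq, if_true, combosB, List.map_append, List.map_map]
        rfl
      · simp [hq]
    · have : (cs.length : Int) ≤ start := by omega
      rw [PySem.List.pyRange_one_eq_nil this]
      unfold posListPV
      rw [PySem.List.pyRange_one_eq_nil this]
      simp [combosB]

-- main equivalence, by induction on the fuel
theorem main_pv :
    ∀ (fuel : Nat) (s : String) (num start : Int), 0 ≤ start →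
      (s.toList.length : Int) ≤ start + fuel →
      genA (fuel + 1) s num start = generate_replacements_alt s num start := by
  intro fuel
  induction fuel with
  | zero =>
    intro s num start h0 hlen
    by_cases hz : (num == 0) = true
    · rw [genA_succ_pv, if_pos hz]
      simp [generate_replacements_alt, hz]
    · have hz' : (num == 0) = false := by simpa using hz
      rw [genA_succ_pv, if_neg (by simp [hz'])]
      rw [PySem.List.pyRange_one_eq_nil (by push_cast at hlen ⊢; omega)]
      simp only [List.foldl_nil]
      by_cases hneg : num < 0
      · simp [generate_replacements_alt, hz', hneg]
      · rw [alt_nonneg_pv s num start (by omega)]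
        unfold posListPV
        rw [PySem.List.pyRange_one_eq_nil (by push_cast at hlen ⊢; omega)]
        have : num.toNat = (num.toNat - 1) + 1 := by simp at hz; omega
        rw [this]
        simp [combosB]
  | succ fuel ih =>
    intro s num start h0 hlen
    by_cases hz : (num == 0) = true
    · rw [show fuel + 1 + 1 = (fuel + 1) + 1 from rfl, genA_succ_pv, if_pos hz]
      simp [generate_replacements_alt, hz]
    · have hz' : (num == 0) = false := by simpa using hz
      rw [show fuel + 1 + 1 = (fuel + 1) + 1 from rfl, genA_succ_pv, if_neg (by simp [hz'])]
      -- the loop body appends a (possibly empty) block at each step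
      have hfun :
          (fun (poss : List String) (i : Int) =>
            if PySem.List.pyGet? s.toList i == some '?' then
              poss ++ genA (fuel + 1)
                (String.ofList (PySem.List.slice s.toList none (some i) ++
                                '#' :: PySem.List.slice s.toList (some (i + 1)) none))
                (num - 1) (i + 1)
            else poss)
          = (fun poss i => poss ++
              (if PySem.List.pyGet? s.toList i == some '?' then
                genA (fuel + 1)
                  (String.ofList (PySem.List.slice s.toList none (some i) ++
                                  '#' :: PySem.List.slice s.toList (some (i + 1)) none))
                  (num - 1) (i + 1)
              else [])) := by
        funext poss i
        split <;> simp
      rw [hfun, PySem.List.foldl_append_eq_flatMap, List.nil_append]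
      -- rewrite each branch via the induction hypothesis
      have hbranch : ∀ i ∈ PySem.List.pyRange start (s.toList.length : Int) 1,
          (if PySem.List.pyGet? s.toList i == some '?' then
              genA (fuel + 1)
                (String.ofList (PySem.List.slice s.toList none (some i) ++
                                '#' :: PySem.List.slice s.toList (some (i + 1)) none))
                (num - 1) (i + 1)
            else [])
          = (if PySem.List.pyGet? s.toList i == some '?' then
              generate_replacements_alt
                (String.ofList (s.toList.set i.toNat '#')) (num - 1) (i + 1)
            else []) := by
        intro i hi
        have hi' := (PySem.List.mem_pyRange_one).1 hi
        by_cases hq : (PySem.List.pyGet? s.toList i == some '?') = true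
        · simp only [hq, if_true]
          rw [slice_set_pv s.toList i (by omega) (by exact_mod_cast hi'.2)]
          have hlen' : ((String.ofList (s.toList.set i.toNat '#')).toList.length : Int)
              ≤ (i + 1) + fuel := by
            rw [String.toList_ofList, List.length_set]; push_cast at hlen ⊢; omega
          exact ih (String.ofList (s.toList.set i.toNat '#')) (num - 1) (i + 1) (by omega) hlen'
        · simp [hq]
      rw [List.flatMap_congr hbranch]
      by_cases hneg : num < 0
      · -- every branch is empty: num - 1 < 0 never reaches 0
        have hall : ∀ i ∈ PySem.List.pyRange start (s.toList.length : Int) 1,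
            (if PySem.List.pyGet? s.toList i == some '?' then
              generate_replacements_alt
                (String.ofList (s.toList.set i.toNat '#')) (num - 1) (i + 1)
            else []) = ([] : List String) := by
          intro i hi
          have h1 : ((num - 1) == 0) = false := by simp; omega
          have h2 : num - 1 < 0 := by omega
          simp [generate_replacements_alt, h1, h2]
        rw [List.flatMap_congr hall]
        simp [generate_replacements_alt, hz', hneg]
      · -- num > 0: use the combinatorial expansion
        have hpos : 0 < num := by simp at hz; omega
        rw [alt_nonneg_pv s num start (by omega)]
        have hk : num.toNat = (num - 1).toNat + 1 := by omega
        rw [hk, combos_expand_pv s.toList (fuel + 1) start (num - 1).toNat h0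
              (by push_cast at hlen ⊢; omega)]
        apply List.flatMap_congr
        intro i hi
        by_cases hq : (PySem.List.pyGet? s.toList i == some '?') = true
        · simp only [hq, if_true]
          rw [alt_nonneg_pv _ (num - 1) (i + 1) (by omega)]
          have hcs : (String.ofList (s.toList.set i.toNat '#')).toList
              = s.toList.set i.toNat '#' := String.toList_ofList
          rw [hcs, posList_set_pv s.toList i
                (by exact_mod_cast ((PySem.List.mem_pyRange_one).1 hi).1.trans' h0)]
          exact List.map_congr_left fun c _ => (applyB_cons_pv s.toList i c).symm
        · simp [hq]

-- ===== VERDICT (by name: the statement is the Claim_ definition above) =====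
theorem generate_replacements_spec : Claim_equal_generate_replacements := by
  intro s num start _ hpre
  unfold Pre_generate_replacements at hpre
  unfold Spec_generate_replacements generate_replacements
  exact main_pv s.toList.length s num start hpre (by omega)
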